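-- pv_equiv track=rewrite | github.com/tenstorrent/tt-vscode-toolkit | content/web/ttlang-sim-lite/ttnnsim.py | _distribute_cores_across_dims
-- ===== SOURCE A (Python) =====
-- from typing import (
--     Any,
--     Callable,
--     FrozenSet,
--     Iterable,
--     List,
--     Optional,
--     Sequence,
--     Set,
--     Tuple,
--     Union,
--     cast,
-- )
--
-- def _distribute_cores_across_dims(num_cores: int, k: int) -> Tuple[int, ...]:
--     """Split ``num_cores`` into ``k`` positive integers whose product is ``num_cores``."""
--     if k <= 0:
--         return ()
--     if k == 1:
--         return (num_cores,)
--     factors = [1] * k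
--     n = num_cores
--     p = 2
--     i = 0
--     while n > 1:
--         if p * p > n:
--             factors[i % k] *= n
--             break
--         if n % p == 0:
--             factors[i % k] *= p
--             n //= p
--             i += 1
--         else:
--             p += 1
--     return tuple(factors)
-- ===== SOURCE B (Python) =====
-- def _smallest_prime_factor(n: int) -> int:
--     """Smallest prime factor of n (n itself when n is prime), for n > 1."""
--     p = 2
--     while p * p <= n:
--         if n % p == 0:
--             return p
--         p += 1
--     return n
--
--
-- def _prime_factors(n: int):
--     """Ordered prime factorization of n with multiplicity (empty for n <= 1)."""
--     if n <= 1: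
--         return []
--     p = _smallest_prime_factor(n)
--     return [p] + _prime_factors(n // p)
--
--
-- def _distribute_cores_across_dims(num_cores: int, k: int):
--     """Split ``num_cores`` into ``k`` positive integers whose product is ``num_cores``."""
--     if k <= 0:
--         return ()
--     if k == 1:
--         return (num_cores,)
--     primes = _prime_factors(num_cores)
--     result = [1] * k
--     # consume the factor list k at a time, multiplying each chunk pointwise into result
--     for start in range(0, len(primes), k):
--         chunk = primes[start:start + k]
--         result = [r * c for r, c in zip(result, chunk)] + result[len(chunk):]
--     return tuple(result)
-- ===== Notes on version B (the rewrite author's own statement) =====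
-- stated objective: alternative
-- what changed: A fuses factoring and bucket assignment in one while-loop that multiplies each factor into factors[i % k] in place as it divides; B instead factors num_cores by recursion on the smallest prime factor and then consumes the materialized factor list k elements at a time, rebuilding the bucket list functionally by a pointwise zip-multiply per chunk, with no modular indexing or in-place mutation.
import Mathlib
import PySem

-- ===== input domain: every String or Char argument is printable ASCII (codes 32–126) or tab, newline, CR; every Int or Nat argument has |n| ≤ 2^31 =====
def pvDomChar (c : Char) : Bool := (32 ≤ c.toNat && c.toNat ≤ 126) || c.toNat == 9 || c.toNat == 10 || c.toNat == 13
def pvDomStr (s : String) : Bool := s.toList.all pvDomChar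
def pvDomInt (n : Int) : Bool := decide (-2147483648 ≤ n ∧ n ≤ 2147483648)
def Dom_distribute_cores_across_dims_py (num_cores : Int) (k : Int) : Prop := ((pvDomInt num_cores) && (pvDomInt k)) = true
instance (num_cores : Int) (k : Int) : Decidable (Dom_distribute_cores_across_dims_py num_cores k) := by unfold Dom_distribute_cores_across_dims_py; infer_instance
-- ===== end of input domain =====

-- B re-implements A with a different decomposition: factor num_cores by recursion on the smallest
-- prime factor, then consume the factor list k at a time with a functional pointwise zip-multiply
-- per chunk (no modular indexing, no in-place bucket mutation); objective: alternative.

-- termination helpers for the trial-division recursions of both ports (hand-written terms)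
theorem pvFloordivToNatLt (n p : Int) (hn : 1 < n) (hp : 2 ≤ p) :
    (PySem.Int.floordiv n p).toNat < n.toNat :=
  let hp1 : (1:Int) < p := lt_of_lt_of_le one_lt_two hp
  let hn0 : (0:Int) < n := lt_trans zero_lt_one hn
  (PySem.Int.floordiv_eq_ediv_of_pos (lt_trans zero_lt_one hp1)).symm ▸
    ((Int.toNat_lt_toNat hn0).mpr
      ((Int.ediv_lt_iff_lt_mul (lt_trans zero_lt_one hp1)).mpr (lt_mul_right hn0 hp1)))

theorem pvSubSuccToNatLt (n p : Int) (h : p < n) : (n - (p + 1)).toNat < (n - p).toNat :=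
  (Int.toNat_lt_toNat (sub_pos.mpr h)).mpr (sub_lt_sub_left (lt_add_one p) n)

theorem pvLtOfSqLe (n p : Int) (hp : 2 ≤ p) (hpp : p * p ≤ n) : p < n :=
  lt_of_lt_of_le
    (lt_mul_left (lt_trans zero_lt_one (lt_of_lt_of_le one_lt_two hp)) (lt_of_lt_of_le one_lt_two hp))
    hpp

theorem pvTwoLeSucc (p : Int) (hp : 2 ≤ p) : 2 ≤ p + 1 :=
  le_trans hp (Int.le_add_of_nonneg_right (by decide))

-- ===== PORT A =====
-- A's while loop: state (factors, n, p, i); `hp : 2 ≤ p` only justifies termination (Python has p = 2).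
def pvALoop (k : Int) (factors : List Int) (n p i : Int) (hp : 2 ≤ p) : List Int :=
  if hn : n > 1 then
    if hpp : p * p > n then
      factors.modify ((PySem.Int.mod i k).toNat) (· * n)
    else if PySem.Int.mod n p = 0 then
      pvALoop k (factors.modify ((PySem.Int.mod i k).toNat) (· * p)) (PySem.Int.floordiv n p) p (i + 1) hp
    else
      pvALoop k factors n (p + 1) i (pvTwoLeSucc p hp)
  else factors
termination_by (n.toNat, (n - p).toNat)
decreasing_by
  · exact Prod.Lex.left _ _ (pvFloordivToNatLt n p hn hp)
  · exact Prod.Lex.right _ (pvSubSuccToNatLt n p (pvLtOfSqLe n p hp (not_lt.mp hpp)))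

def distribute_cores_across_dims_py (num_cores : Int) (k : Int) : List Int :=
  if k ≤ 0 then []
  else if k = 1 then [num_cores]
  else pvALoop k (List.replicate k.toNat 1) num_cores 2 0 (le_refl 2)

-- ===== PORT B =====
-- Source B's _smallest_prime_factor: `p = 2; while p*p <= n: if n % p == 0: return p; p += 1; return n`;
-- `hp : 2 ≤ p` only justifies termination (Python has p = 2).
def pvSpf (n p : Int) (hp : 2 ≤ p) : Int :=
  if hpp : p * p ≤ n then
    if PySem.Int.mod n p = 0 then p
    else pvSpf n (p + 1) (pvTwoLeSucc p hp)
  else n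
termination_by (n - p).toNat
decreasing_by exact pvSubSuccToNatLt n p (pvLtOfSqLe n p hp hpp)

-- the smallest-prime-factor search never returns a value below 2 (termination helper for pvPrimeFactors)
theorem pvSpf_ge_two (n p : Int) (hp : 2 ≤ p) (hn : 1 < n) : 2 ≤ pvSpf n p hp := by
  rw [pvSpf]
  by_cases hpp : p * p ≤ n
  · by_cases hd : PySem.Int.mod n p = 0
    · simp only [hpp, dite_true, hd, if_true]; exact hp
    · simp only [hpp, dite_true, hd, if_false]
      exact pvSpf_ge_two n (p + 1) (pvTwoLeSucc p hp) hn
  · simp only [hpp, dite_false]; exact Int.lt_iff_add_one_le.mp hn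
termination_by (n - p).toNat
decreasing_by exact pvSubSuccToNatLt n p (pvLtOfSqLe n p hp hpp)

-- Source B's _prime_factors: `if n <= 1: return []; p = _smallest_prime_factor(n); return [p] + _prime_factors(n // p)`
def pvPrimeFactors (n : Int) : List Int :=
  if h : n ≤ 1 then []
  else
    pvSpf n 2 (le_refl 2) :: pvPrimeFactors (PySem.Int.floordiv n (pvSpf n 2 (le_refl 2)))
termination_by n.toNat
decreasing_by
  exact pvFloordivToNatLt n _ (lt_of_not_ge h) (pvSpf_ge_two n 2 (le_refl 2) (lt_of_not_ge h))

-- Source B's loop body: chunk = primes[start:start+k]; result = [r*c for r,c in zip(result, chunk)] + result[len(chunk):]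
def pvChunkStep (primes : List Int) (k : Int) (result : List Int) (start : Int) : List Int :=
  let chunk := PySem.List.slice primes (some start) (some (start + k))
  (List.zipWith (· * ·) result chunk) ++ result.drop chunk.length

def distribute_cores_across_dims_py_alt (num_cores : Int) (k : Int) : List Int :=
  if k ≤ 0 then []
  else if k = 1 then [num_cores]
  else
    let primes := pvPrimeFactors num_cores
    (PySem.List.pyRange 0 (primes.length : Int) k).foldl (pvChunkStep primes k) (List.replicate k.toNat 1)

-- ===== PRECONDITION & SPEC =====
def Spec_distribute_cores_across_dims_py (num_cores : Int) (k : Int) (out : List Int) : Prop := out = distribute_cores_across_dims_py_alt num_cores k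
instance (num_cores : Int) (k : Int) (out : List Int) : Decidable (Spec_distribute_cores_across_dims_py num_cores k out) := by unfold Spec_distribute_cores_across_dims_py; infer_instance

-- ===== CLAIM (what is proved, stated in full; the proofs are below) =====
def Claim_equal_distribute_cores_across_dims_py : Prop := ∀ (num_cores : Int) (k : Int), Dom_distribute_cores_across_dims_py num_cores k → Spec_distribute_cores_across_dims_py num_cores k (distribute_cores_across_dims_py num_cores k)

-- ===== LEMMAS AND PROOFS =====

-- proof-side name for A's round-robin step
def pvRR (k : Int) : List Int × Int → Int → List Int × Int :=
  fun st f => (st.1.modify ((PySem.Int.mod st.2 k).toNat) (· * f), st.2 + 1)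

-- proof-side: the stream of factors A's fused loop multiplies in, in order (carry-over trial division)
def pvChain (n p : Int) (hp : 2 ≤ p) : List Int :=
  if hpp : p * p ≤ n then
    if PySem.Int.mod n p = 0 then
      p :: pvChain (PySem.Int.floordiv n p) p hp
    else
      pvChain n (p + 1) (by omega)
  else if n > 1 then [n] else []
termination_by (n.toNat, (n + 1 - p).toNat)
decreasing_by
  · exact Prod.Lex.left _ _ (pvFloordivToNatLt n p (by nlinarith) hp)
  · refine Prod.Lex.right _ ?_
    have h2 : p < n := by nlinarith
    omega

-- proof-side: B's chunked pass, recursively (chunk off the first k factors, zip-multiply, recurse)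
def pvChunkFold (k : Int) (hk : 0 < k.toNat) (L result : List Int) : List Int :=
  if hL : L = [] then result
  else
    pvChunkFold k hk (L.drop k.toNat)
      ((List.zipWith (· * ·) result (L.take k.toNat)) ++ result.drop (L.take k.toNat).length)
termination_by L.length
decreasing_by
  have : L.length ≠ 0 := by simp [hL]
  simp; omega

-- A's fused loop computes exactly: fold the round-robin step over the materialized factor stream.
theorem pvALoop_eq_fold (k : Int) (n p i : Int) (hp : 2 ≤ p) (factors : List Int) :
    pvALoop k factors n p i hp = ((pvChain n p hp).foldl (pvRR k) (factors, i)).1 := by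
  fun_induction pvALoop k factors n p i hp with
  | case1 factors n p i hp hn hpp =>
    rw [pvChain]
    have : ¬ p * p ≤ n := by omega
    simp [this, hn, pvRR]
  | case2 factors n p i hp hn hpp hdvd ih =>
    rw [pvChain]
    have hle : p * p ≤ n := by omega
    simp only [hle, dite_true, hdvd, if_true, List.foldl_cons]
    exact ih
  | case3 factors n p i hp hn hpp hdvd ih =>
    rw [pvChain]
    have hle : p * p ≤ n := by omega
    simp only [hle, dite_true, hdvd, if_false]
    exact ih
  | case4 factors n p i hp hn =>
    rw [pvChain]
    have : ¬ p * p ≤ n := by intro h; nlinarith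
    simp [this, hn]

-- the spf search from 2 equals the search from p when nothing below p divides n
theorem pvSpf_shift (n q p : Int) (hq : 2 ≤ q) (hp : 2 ≤ p) (hqp : q ≤ p)
    (hnd : ∀ r, q ≤ r → r < p → PySem.Int.mod n r ≠ 0) : pvSpf n q hq = pvSpf n p hp := by
  rcases eq_or_lt_of_le hqp with heq | hlt
  · subst heq; rfl
  · rw [pvSpf]
    by_cases hpp : q * q ≤ n
    · have hnd0 : PySem.Int.mod n q ≠ 0 := hnd q le_rfl hlt
      simp only [hpp, dite_true, hnd0, if_false]
      exact pvSpf_shift n (q + 1) p (by omega) hp (by omega)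
        (fun r hr1 hr2 => hnd r (by omega) hr2)
    · have hpp' : ¬ p * p ≤ n := by nlinarith [not_le.mp hpp]
      conv_rhs => rw [pvSpf]
      simp [hpp, hpp']
termination_by (p - q).toNat

-- the carry-over factor stream of A equals B's smallest-prime-factor factorization
theorem pvChain_eq_primeFactors (n p : Int) (hp : 2 ≤ p)
    (hnd : ∀ q, 2 ≤ q → q < p → PySem.Int.mod n q ≠ 0) :
    pvChain n p hp = pvPrimeFactors n := by
  fun_induction pvChain n p hp with
  | case1 n p hp hpp hdvd ih =>
    have hn : 1 < n := by nlinarith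
    have hspf : pvSpf n 2 (by omega) = p := by
      rw [pvSpf_shift n 2 p (by omega) hp (by omega) (fun r h1 h2 => hnd r h1 h2)]
      rw [pvSpf]; simp [hpp, hdvd]
    rw [pvPrimeFactors]
    simp only [show ¬ n ≤ 1 by omega, dite_false, hspf]
    have hdvd' : p ∣ n := (PySem.Int.mod_eq_zero_iff_dvd n p).mp hdvd
    refine congrArg _ (ih ?_)
    intro q hq1 hq2 hmod
    have hqdvd : q ∣ PySem.Int.floordiv n p := (PySem.Int.mod_eq_zero_iff_dvd _ q).mp hmod
    have hfd : PySem.Int.floordiv n p ∣ n := by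
      rw [PySem.Int.floordiv_eq_ediv_of_pos (by omega)]
      exact Int.ediv_dvd_of_dvd hdvd'
    exact hnd q hq1 hq2 ((PySem.Int.mod_eq_zero_iff_dvd n q).mpr (hqdvd.trans hfd))
  | case2 n p hp hpp hdvd ih =>
    refine ih ?_
    intro q hq1 hq2
    rcases lt_or_eq_of_le (show q ≤ p by omega) with h | h
    · exact hnd q hq1 h
    · subst h; exact hdvd
  | case3 =>
    rename_i n p hp hpp hn
    · have hspf : pvSpf n 2 (by omega) = n := by
        rw [pvSpf_shift n 2 p (by omega) hp (by omega) (fun r h1 h2 => hnd r h1 h2)]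
        rw [pvSpf]; simp [hpp]
      rw [pvPrimeFactors]
      simp only [show ¬ n ≤ 1 by omega, dite_false, hspf]
      have h1 : PySem.Int.floordiv n n = 1 := by
        rw [PySem.Int.floordiv_eq_ediv_of_pos (by omega)]
        exact Int.ediv_self (by omega)
      rw [h1, pvPrimeFactors]
      simp
  | case4 =>
    rename_i n p hp hpp hn
    rw [pvPrimeFactors]
    simp [show n ≤ 1 by omega]

-- positive-step pyRange: nil and cons forms
theorem pvPyRange_nil (a b k : Int) (hk : 0 < k) (h : b ≤ a) : PySem.List.pyRange a b k = [] := by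
  rw [PySem.List.pyRange_of_pos a b hk]
  simp [show ¬ a < b by omega]

theorem pvPyRange_cons (a b k : Int) (hk : 0 < k) (h : a < b) :
    PySem.List.pyRange a b k = a :: PySem.List.pyRange (a + k) b k := by
  rw [PySem.List.pyRange_of_pos a b hk, PySem.List.pyRange_of_pos (a + k) b hk]
  simp only [h, if_true]
  by_cases h2 : a + k < b
  · have e1 : (b - a + k - 1) / k = (b - (a + k) + k - 1) / k + 1 := by
      have e0 : b - a + k - 1 = (b - (a + k) + k - 1) + 1 * k := by ring
      rw [e0, Int.add_mul_ediv_right _ _ (by omega)]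
    have hnn : 0 ≤ (b - (a + k) + k - 1) / k := Int.ediv_nonneg (by omega) (by omega)
    rw [e1]
    simp only [h2, if_true]
    rw [show ((b - (a + k) + k - 1) / k + 1).toNat = ((b - (a + k) + k - 1) / k).toNat + 1 by omega]
    rw [List.range_succ_eq_map, List.map_cons, List.map_map]
    refine congrArg₂ _ (by ring) (List.map_congr_left ?_)
    intro x _; simp; ring
  · have e1 : (b - a + k - 1) / k = 1 := by
      have e0 : b - a + k - 1 = (b - a - 1) + 1 * k := by ring
      rw [e0, Int.add_mul_ediv_right _ _ (by omega)]
      rw [Int.ediv_eq_zero_of_lt (by omega) (by omega)]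
      norm_num
    rw [e1]
    simp [h2]

-- the pyRange-driven chunk loop of B equals the recursive chunk fold, from any aligned start
theorem pvFold_drop (k : Int) (hk : 2 ≤ k) (hk' : 0 < k.toNat) (P : List Int) (s : Int) (hs : 0 ≤ s)
    (res : List Int) :
    (PySem.List.pyRange s (P.length : Int) k).foldl (pvChunkStep P k) res
      = pvChunkFold k hk' (P.drop s.toNat) res := by
  by_cases h : (P.length : Int) ≤ s
  · rw [pvPyRange_nil s _ k (by omega) h]
    have hd : P.drop s.toNat = [] := by
      rw [List.drop_eq_nil_iff]; omega
    rw [pvChunkFold]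
    simp [hd]
  · rw [pvPyRange_cons s _ k (by omega) (by omega)]
    rw [List.foldl_cons]
    have hstep : pvChunkStep P k res s
        = (List.zipWith (· * ·) res ((P.drop s.toNat).take k.toNat))
            ++ res.drop ((P.drop s.toNat).take k.toNat).length := by
      unfold pvChunkStep
      rw [PySem.List.slice_toNat P hs (by omega)]
      rw [show (s + k).toNat - s.toNat = k.toNat by omega]
    rw [hstep]
    rw [pvFold_drop k hk hk' P (s + k) (by omega) _]
    conv_rhs => rw [pvChunkFold]
    have hne : P.drop s.toNat ≠ [] := by
      simp only [ne_eq, List.drop_eq_nil_iff]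
      omega
    simp only [hne, dite_false]
    rw [List.drop_drop]
    congr 2
    omega
termination_by ((P.length : Int) - s).toNat
decreasing_by omega

-- one round-robin pass over a segment that fits inside the buckets multiplies it in pointwise
theorem pvRR_seg (k : Int) (hk : 2 ≤ k) (c : List Int) (res : List Int) (i : Nat)
    (hlen : i + c.length ≤ res.length) (hres : res.length = k.toNat) :
    c.foldl (pvRR k) (res, (i : Int))
      = (res.take i ++ List.zipWith (· * ·) (res.drop i) c ++ res.drop (i + c.length),
         (i : Int) + c.length) := by
  induction c generalizing res i with
  | nil => simp
  | cons f c' ih =>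
    have hik : i < res.length := by simp only [List.length_cons] at hlen; omega
    have hmod : PySem.Int.mod (i : Int) k = (i : Int) := by
      rw [PySem.Int.mod_eq_emod_of_pos (by omega)]
      exact Int.emod_eq_of_lt (by omega) (by omega)
    have hstep : pvRR k (res, (i : Int)) f = (res.modify i (· * f), (i : Int) + 1) := by
      simp [pvRR, hmod]
    rw [List.foldl_cons, hstep]
    have hdecomp : res.modify i (· * f) = res.take i ++ (res[i] * f) :: res.drop (i + 1) := by
      rw [List.modify_eq_set (· * f) i res]
      rw [List.set_eq_take_append_cons_drop]
      simp [hik]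
    rw [show ((i : Int) + 1) = ((i + 1 : Nat) : Int) by push_cast; ring]
    rw [ih (res.modify i (· * f)) (i + 1)
      (by rw [List.length_modify]; simp only [List.length_cons] at hlen; omega)
      (by rw [List.length_modify]; omega)]
    have h1 : (List.take i res).length = i := by rw [List.length_take]; omega
    have h1le : (List.take i res).length ≤ i + 1 := by omega
    have htk : (res.modify i (· * f)).take (i + 1) = res.take i ++ [res[i] * f] := by
      rw [hdecomp, List.take_append]
      rw [List.take_of_length_le h1le, h1, show i + 1 - i = 1 by omega]
      simp
    have hdr : (res.modify i (· * f)).drop (i + 1) = res.drop (i + 1) := by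
      rw [hdecomp, List.drop_append]
      rw [List.drop_of_length_le h1le, h1, show i + 1 - i = 1 by omega]
      simp
    have hdr2 : (res.modify i (· * f)).drop (i + 1 + c'.length) = res.drop (i + 1 + c'.length) := by
      rw [show i + 1 + c'.length = (i + 1) + c'.length from rfl, ← List.drop_drop, hdr,
        List.drop_drop]
    have hhead : res.drop i = res[i] :: res.drop (i + 1) := List.drop_eq_getElem_cons hik
    rw [htk, hdr, hdr2, hhead]
    simp only [List.zipWith_cons_cons, List.length_cons]
    refine Prod.ext ?_ (by push_cast; ring)
    simp only [List.append_assoc, List.cons_append, List.nil_append]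
    rw [show i + 1 + c'.length = i + (c'.length + 1) from by omega]

-- the first component of the round-robin fold is invariant under shifting the counter by k
theorem pvRR_fst_shift (k : Int) (hk : 0 < k) (L : List Int) (res : List Int) (i : Int) :
    (L.foldl (pvRR k) (res, i + k)).1 = (L.foldl (pvRR k) (res, i)).1 := by
  induction L generalizing res i with
  | nil => rfl
  | cons f L' ih =>
    have hmod : PySem.Int.mod (i + k) k = PySem.Int.mod i k := by
      rw [PySem.Int.mod_eq_emod_of_pos hk, PySem.Int.mod_eq_emod_of_pos hk]
      simp
    simp only [List.foldl_cons, pvRR, hmod]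
    rw [show i + k + 1 = (i + 1) + k by ring]
    exact ih _ _

-- the round-robin fold from counter 0 equals B's chunked fold
theorem pvRR_eq_chunkFold (k : Int) (hk : 2 ≤ k) (hk' : 0 < k.toNat) (L res : List Int)
    (hres : res.length = k.toNat) :
    (L.foldl (pvRR k) (res, 0)).1 = pvChunkFold k hk' L res := by
  by_cases hL : L = []
  · subst hL; rw [pvChunkFold]; simp
  · have hsplit : L = L.take k.toNat ++ L.drop k.toNat := (List.take_append_drop _ _).symm
    have hclen : (L.take k.toNat).length ≤ res.length := by simp [hres]
    rw [pvChunkFold]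
    simp only [hL, dite_false]
    conv_lhs => rw [hsplit]
    rw [List.foldl_append]
    rw [show (0 : Int) = ((0 : Nat) : Int) by norm_num]
    rw [pvRR_seg k hk _ res 0 (by simp only [Nat.zero_add] at *; omega) hres]
    simp only [List.take_zero, List.drop_zero, List.nil_append, Nat.cast_zero,
      zero_add]
    set res' := List.zipWith (· * ·) res (L.take k.toNat) ++ res.drop (L.take k.toNat).length
      with hres'def
    have hres'len : res'.length = k.toNat := by
      simp [hres'def]
      omega
    by_cases hfull : k.toNat ≤ L.length
    · have hcl : (L.take k.toNat).length = k.toNat := by simp; omega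
      have hcast : ((L.take k.toNat).length : Int) = k := by rw [hcl]; omega
      have hshift := pvRR_fst_shift k (by omega) (L.drop k.toNat) res' 0
      rw [zero_add] at hshift
      rw [hcast, hshift]
      exact pvRR_eq_chunkFold k hk hk' (L.drop k.toNat) res' hres'len
    · have hdrop : L.drop k.toNat = [] := List.drop_eq_nil_of_le (by omega)
      rw [hdrop]
      simp only [List.foldl_nil]
      rw [pvChunkFold]
      simp
termination_by L.length
decreasing_by
  simp
  omega

-- ===== VERDICT (by name: the statement is the Claim_ definition above) =====
theorem distribute_cores_across_dims_py_spec : Claim_equal_distribute_cores_across_dims_py := by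
  intro num_cores k _
  unfold Spec_distribute_cores_across_dims_py
  unfold distribute_cores_across_dims_py distribute_cores_across_dims_py_alt
  by_cases h0 : k ≤ 0
  · simp [h0]
  · by_cases h1 : k = 1
    · simp [h1]
    · simp only [h0, h1, if_false]
      have hk : 2 ≤ k := by omega
      have hk' : 0 < k.toNat := by omega
      rw [pvALoop_eq_fold]
      rw [pvChain_eq_primeFactors num_cores 2 (by omega) (by omega)]
      rw [pvRR_eq_chunkFold k hk hk' _ _ (by simp)]
      rw [pvFold_drop k hk hk' (pvPrimeFactors num_cores) 0 (by omega)]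
      simp
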